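-- pv_equiv track=rewrite | github.com/kanzd/coding-test | ques1/ques1.py | check
-- ===== SOURCE A (Python) =====
-- def check(st):
--     map={}
--     for i in st:
--         if i in map:
--             map[i]+=1
--         else:
--             map[i]=1
--     ls=list(map.values())
--
--     for i in ls:
--      k=0
--      while k<len(ls)-1:
--         if ((i-ls[k+1]) in ls) or ((ls[k+1]-i) in ls):
--             return "Dynamic"
--         k+=1
--     return "Not"
-- ===== SOURCE B (Python) =====
-- def check(st):
--     counts = {}
--     for c in st:
--         counts[c] = counts.get(c, 0) + 1
--     arr = sorted(set(counts.values()))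
--     n = len(arr)
--     for t in arr:
--         lo, hi = 0, n - 1
--         while lo <= hi:
--             s = arr[lo] + arr[hi]
--             if s == t:
--                 return "Dynamic"
--             elif s < t:
--                 lo += 1
--             else:
--                 hi -= 1
--     return "Not"
-- ===== Notes on version B (the rewrite author's own statement) =====
-- stated objective: alternative
-- what changed: A scans every count against every other count and tests two subtraction memberships in the whole list; B sorts the distinct counts and, for each target count, runs a converging two-pointer search for two counts summing to it.
import Mathlib
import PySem

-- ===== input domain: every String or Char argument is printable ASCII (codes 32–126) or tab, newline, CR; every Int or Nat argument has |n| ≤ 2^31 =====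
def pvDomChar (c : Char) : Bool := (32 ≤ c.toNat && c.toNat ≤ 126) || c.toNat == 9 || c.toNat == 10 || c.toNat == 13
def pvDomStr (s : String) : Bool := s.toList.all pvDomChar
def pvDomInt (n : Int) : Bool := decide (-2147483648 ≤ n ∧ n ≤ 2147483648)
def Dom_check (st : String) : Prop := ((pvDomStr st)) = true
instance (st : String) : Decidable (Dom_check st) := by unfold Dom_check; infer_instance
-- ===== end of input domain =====

-- B replaces A's nested membership scans over the count list by sorting the distinct counts
-- and, for each target count, a converging two-pointer search for two counts summing to it.

-- ===== PORT A =====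
-- A: count chars into a dict, then for each value i and each value ls[k+1] (k = 0 .. len-2)
-- test (i - ls[k+1]) in ls or (ls[k+1] - i) in ls; early return "Dynamic" ported as List.any.
def check (st : String) : String :=
  let m := st.toList.foldl
    (fun d i => if d.contains i then d.modify i 0 (· + 1) else d.insert i 1)
    (PySem.Dict.empty : PySem.Dict Char Int)
  let ls := m.values
  if ls.any (fun i =>
      (PySem.List.pyRange 0 ((ls.length : Int) - 1) 1).any (fun k =>
        -- ls[k+1] is always in range here (1 ≤ k+1 ≤ len-1), so pyGetD is exact
        ls.contains (i - PySem.List.pyGetD ls (k + 1) 0) ||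
        ls.contains (PySem.List.pyGetD ls (k + 1) 0 - i)))
  then "Dynamic" else "Not"

-- ===== PORT B =====
-- two-pointer scan of Source B; every index reached from check_alt is in range, so pyGetD is exact
def twoPtr (arr : List Int) (t lo hi : Int) : Bool :=
  if lo ≤ hi then
    -- s = arr[lo] + arr[hi], inlined
    if PySem.List.pyGetD arr lo 0 + PySem.List.pyGetD arr hi 0 = t then true
    else if PySem.List.pyGetD arr lo 0 + PySem.List.pyGetD arr hi 0 < t then twoPtr arr t (lo + 1) hi
    else twoPtr arr t lo (hi - 1)
  else false
termination_by (hi + 1 - lo).toNat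
decreasing_by all_goals omega

def check_alt (st : String) : String :=
  let counts := st.toList.foldl
    (fun d c => d.insert c (d.getD c 0 + 1)) (PySem.Dict.empty : PySem.Dict Char Int)
  let arr := PySem.List.sorted (PySem.Set.ofList counts.values) (fun x => x)
  if arr.any (fun t => twoPtr arr t 0 ((arr.length : Int) - 1)) then "Dynamic" else "Not"

-- ===== PRECONDITION & SPEC =====
def Spec_check (st : String) (out : String) : Prop := out = check_alt st
instance (st : String) (out : String) : Decidable (Spec_check st out) := by unfold Spec_check; infer_instance

-- ===== CLAIM (what is proved, stated in full; the proofs are below) =====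
def Claim_equal_check : Prop := ∀ (st : String), Dom_check st → Spec_check st (check st)

-- ===== LEMMAS AND PROOFS =====

-- "some value is the sum of two (not necessarily distinct) values"
def sumCond (L : List Int) : Prop := ∃ a ∈ L, ∃ b ∈ L, a + b ∈ L

theorem sumCond_congr {L M : List Int} (h : ∀ x, x ∈ L ↔ x ∈ M) : sumCond L ↔ sumCond M := by
  unfold sumCond
  constructor
  · rintro ⟨a, ha, b, hb, hs⟩; exact ⟨a, (h a).1 ha, b, (h b).1 hb, (h _).1 hs⟩
  · rintro ⟨a, ha, b, hb, hs⟩; exact ⟨a, (h a).2 ha, b, (h b).2 hb, (h _).2 hs⟩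

-- A's counting loop is Counter(st)
theorem foldA_eq_counter (cs : List Char) :
    cs.foldl (fun d i => if d.contains i then d.modify i 0 (· + 1) else d.insert i 1)
      (PySem.Dict.empty : PySem.Dict Char Int) = PySem.Dict.counter cs := by
  have hstep : (fun (d : PySem.Dict Char Int) (i : Char) =>
      if d.contains i then d.modify i 0 (· + 1) else d.insert i 1)
      = (fun (d : PySem.Dict Char Int) (i : Char) => d.modify i 0 (· + 1)) := by
    funext d i
    by_cases h : d.contains i = true
    · simp [h]
    · have h' : d.contains i = false := by simpa using h
      simp [h', PySem.Dict.modify, PySem.Dict.getD_of_not_contains d (0 : Int) h']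
  rw [hstep, ← PySem.Dict.counter_eq_foldl]

-- B's counting loop is Counter(st)
theorem foldB_eq_counter (cs : List Char) :
    cs.foldl (fun d c => d.insert c (d.getD c 0 + 1))
      (PySem.Dict.empty : PySem.Dict Char Int) = PySem.Dict.counter cs :=
  PySem.Dict.foldl_insert_getD_add_one_eq_counter cs

theorem mem_values_counter (cs : List Char) (x : Int) :
    x ∈ (PySem.Dict.counter cs).values ↔ ∃ c ∈ cs, ((cs.count c : Int)) = x := by
  unfold PySem.Dict.values
  rw [PySem.Dict.items_counter]
  simp [List.mem_map, PySem.Set.mem_ofList]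

theorem values_counter_pos (cs : List Char) : ∀ x ∈ (PySem.Dict.counter cs).values, 1 ≤ x := by
  intro x hx
  obtain ⟨c, hc, rfl⟩ := (mem_values_counter cs x).1 hx
  have := List.count_pos_iff.mpr hc
  omega

-- A's inner while loop, as a scan of ls.tail
theorem inner_any_iff (ls : List Int) (i : Int) :
    ((PySem.List.pyRange 0 ((ls.length : Int) - 1) 1).any (fun k =>
        ls.contains (i - PySem.List.pyGetD ls (k + 1) 0) ||
        ls.contains (PySem.List.pyGetD ls (k + 1) 0 - i)) = true)
      ↔ ∃ v ∈ ls.tail, ((i - v) ∈ ls ∨ (v - i) ∈ ls) := by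
  rw [List.any_eq_true]
  constructor
  · rintro ⟨k, hk, hgk⟩
    rw [PySem.List.mem_pyRange_one] at hk
    rw [PySem.List.pyGetD_eq_getElem ls (0 : Int) (by omega) (by omega)] at hgk
    refine ⟨ls[(k + 1).toNat], ?_, ?_⟩
    · have hlt : (k + 1).toNat - 1 < ls.tail.length := by
        simp [List.length_tail]; omega
      have : ls.tail[(k + 1).toNat - 1] = ls[(k + 1).toNat] := by
        rw [List.getElem_tail]
        congr 1
        omega
      rw [← this]
      exact List.getElem_mem hlt
    · simpa [List.contains_iff_mem] using hgk
  · rintro ⟨v, hv, hcase⟩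
    obtain ⟨m, hm, rfl⟩ := List.mem_iff_getElem.mp hv
    have hm' : m < ls.length - 1 := by simpa [List.length_tail] using hm
    have hnz : 1 ≤ ls.length := by omega
    refine ⟨(m : Int), ?_, ?_⟩
    · rw [PySem.List.mem_pyRange_one]
      omega
    · rw [PySem.List.pyGetD_eq_getElem ls (0 : Int) (by omega) (by omega)]
      have : ls[((m : Int) + 1).toNat] = ls.tail[m] := by
        rw [List.getElem_tail]
        congr 1
      rw [this]
      simpa [List.contains_iff_mem] using hcase

-- A's nested scan decides sumCond (uses positivity of the counts)
theorem acond_iff_sumCond (ls : List Int) (hpos : ∀ v ∈ ls, 1 ≤ v) :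
    (∃ i ∈ ls, ∃ v ∈ ls.tail, ((i - v) ∈ ls ∨ (v - i) ∈ ls)) ↔ sumCond ls := by
  constructor
  · rintro ⟨i, hi, v, hv, hcase⟩
    have hv' : v ∈ ls := List.mem_of_mem_tail hv
    rcases hcase with h | h
    · exact ⟨i - v, h, v, hv', by simpa using hi⟩
    · exact ⟨v - i, h, i, hi, by simpa using hv'⟩
  · rintro ⟨a, ha, b, hb, hs⟩
    rcases ls with _ | ⟨h0, t⟩
    · cases ha
    by_cases hbt : b ∈ t
    · exact ⟨a + b, hs, b, hbt, Or.inl (by simpa using ha)⟩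
    · have hb0 : b = h0 := by
        rcases List.mem_cons.mp hb with h | h
        · exact h
        · exact absurd h hbt
      by_cases hat : a ∈ t
      · refine ⟨a + b, hs, a, hat, Or.inl ?_⟩
        simpa [add_sub_cancel_left] using hb
      · have ha0 : a = h0 := by
          rcases List.mem_cons.mp ha with h | h
          · exact h
          · exact absurd h hat
        by_cases hst : a + b ∈ t
        · refine ⟨a, ha, a + b, hst, Or.inr ?_⟩
          simpa [add_sub_cancel_left] using hb
        · have hs0 : a + b = h0 := by
            rcases List.mem_cons.mp hs with h | h
            · exact h
            · exact absurd h hst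
          have h1 : (1 : Int) ≤ h0 := hpos h0 (List.mem_cons_self)
          omega

-- monotone access on a (≤)-sorted array
theorem getD_mono {arr : List Int} (hs : arr.Pairwise (· ≤ ·)) {i j : Int}
    (h0 : 0 ≤ i) (hij : i ≤ j) (hj : j < (arr.length : Int)) :
    PySem.List.pyGetD arr i 0 ≤ PySem.List.pyGetD arr j 0 := by
  rw [PySem.List.pyGetD_eq_getElem arr (0 : Int) h0 (by omega),
      PySem.List.pyGetD_eq_getElem arr (0 : Int) (by omega) hj]
  rcases eq_or_lt_of_le hij with h | h
  · subst h; exact le_refl _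
  · exact List.pairwise_iff_getElem.mp hs i.toNat j.toNat (by omega) (by omega) (by omega)

-- two-pointer: soundness
theorem twoPtr_true {arr : List Int} {t lo hi : Int} (h : twoPtr arr t lo hi = true) :
    ∃ i j : Int, lo ≤ i ∧ i ≤ j ∧ j ≤ hi ∧
      PySem.List.pyGetD arr i 0 + PySem.List.pyGetD arr j 0 = t := by
  induction lo, hi using twoPtr.induct arr t with
  | case1 lo hi hle hsum =>
    exact ⟨lo, hi, le_refl _, hle, le_refl _, hsum⟩
  | case2 lo hi hle hne hlt ih =>
    rw [twoPtr.eq_def, if_pos hle, if_neg hne, if_pos hlt] at h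
    obtain ⟨i, j, h1, h2, h3, h4⟩ := ih h
    exact ⟨i, j, by omega, h2, h3, h4⟩
  | case3 lo hi hle hne hge ih =>
    rw [twoPtr.eq_def, if_pos hle, if_neg hne, if_neg hge] at h
    obtain ⟨i, j, h1, h2, h3, h4⟩ := ih h
    exact ⟨i, j, h1, h2, by omega, h4⟩
  | case4 lo hi hle =>
    rw [twoPtr.eq_def, if_neg hle] at h
    cases h

-- two-pointer: completeness on a (≤)-sorted array
theorem twoPtr_false {arr : List Int} (hs : arr.Pairwise (· ≤ ·)) {t lo hi : Int}
    (hlo : 0 ≤ lo) (hhi : hi < (arr.length : Int))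
    (h : twoPtr arr t lo hi = false) :
    ∀ i j : Int, lo ≤ i → i ≤ j → j ≤ hi →
      PySem.List.pyGetD arr i 0 + PySem.List.pyGetD arr j 0 ≠ t := by
  induction lo, hi using twoPtr.induct arr t with
  | case1 lo hi hle hsum =>
    rw [twoPtr.eq_def, if_pos hle, if_pos hsum] at h
    cases h
  | case2 lo hi hle hne hlt ih =>
    rw [twoPtr.eq_def, if_pos hle, if_neg hne, if_pos hlt] at h
    intro i j h1 h2 h3
    rcases eq_or_lt_of_le h1 with rfl | hlt'
    · -- i = lo: arr[i] + arr[j] ≤ arr[lo] + arr[hi] < t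
      have hle2 : PySem.List.pyGetD arr j 0 ≤ PySem.List.pyGetD arr hi 0 :=
        getD_mono hs (by omega) h3 hhi
      omega
    · exact ih (by omega) hhi h i j (by omega) h2 h3
  | case3 lo hi hle hne hge ih =>
    rw [twoPtr.eq_def, if_pos hle, if_neg hne, if_neg hge] at h
    intro i j h1 h2 h3
    rcases eq_or_lt_of_le h3 with rfl | hlt'
    · have hle2 : PySem.List.pyGetD arr lo 0 ≤ PySem.List.pyGetD arr i 0 :=
        getD_mono hs hlo h1 (by omega)
      omega
    · exact ih hlo (by omega) h i j h1 h2 (by omega)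
  | case4 lo hi hle =>
    intro i j h1 h2 h3
    omega

theorem bcond_iff_sumCond (arr : List Int) (hs : arr.Pairwise (· < ·)) :
    (arr.any (fun t => twoPtr arr t 0 ((arr.length : Int) - 1)) = true) ↔ sumCond arr := by
  have hs' : arr.Pairwise (· ≤ ·) := hs.imp le_of_lt
  rw [List.any_eq_true]
  constructor
  · rintro ⟨t, ht, htp⟩
    obtain ⟨i, j, h0i, hij, hjn, hsum⟩ := twoPtr_true htp
    have hne : arr ≠ [] := by rintro rfl; cases ht
    have hlen : 1 ≤ arr.length := List.length_pos_iff.mpr hne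
    have hi : PySem.List.pyGetD arr i 0 ∈ arr := by
      rw [PySem.List.pyGetD_eq_getElem arr (0 : Int) h0i (by omega)]
      exact List.getElem_mem (by omega)
    have hj : PySem.List.pyGetD arr j 0 ∈ arr := by
      rw [PySem.List.pyGetD_eq_getElem arr (0 : Int) (by omega) (by omega)]
      exact List.getElem_mem (by omega)
    exact ⟨_, hi, _, hj, hsum ▸ ht⟩
  · rintro ⟨a, ha, b, hb, hsum⟩
    refine ⟨a + b, hsum, ?_⟩
    -- sorted indices for the smaller and larger addend
    have key : ∀ x y : Int, x ∈ arr → y ∈ arr → x ≤ y → x + y = a + b →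
        twoPtr arr (a + b) 0 ((arr.length : Int) - 1) = true := by
      intro x y hx hy hxy hxysum
      obtain ⟨i, hi, rfl⟩ := List.mem_iff_getElem.mp hx
      obtain ⟨j, hj, rfl⟩ := List.mem_iff_getElem.mp hy
      have hij : i ≤ j := by
        by_contra hji
        have := List.pairwise_iff_getElem.mp hs j i hj hi (by omega)
        omega
      by_contra hfalse
      have hfalse' : twoPtr arr (a + b) 0 ((arr.length : Int) - 1) = false := by
        simpa using hfalse
      refine twoPtr_false hs' (le_refl 0) (by omega) hfalse' (i : Int) (j : Int)
        (by omega) (by omega) (by omega) ?_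
      rw [PySem.List.pyGetD_eq_getElem arr (0 : Int) (by omega) (by omega),
          PySem.List.pyGetD_eq_getElem arr (0 : Int) (by omega) (by omega)]
      simpa using hxysum
    rcases le_total a b with hab | hab
    · exact key a b ha hb hab rfl
    · exact key b a hb ha hab (by ring)

-- ===== VERDICT (by name: the statement is the Claim_ definition above) =====
theorem check_spec : Claim_equal_check := by
  intro st _
  unfold Spec_check check check_alt
  rw [foldA_eq_counter, foldB_eq_counter]
  simp only []
  set cs := st.toList with hcs
  set ls := (PySem.Dict.counter cs).values with hls
  set arr := PySem.List.sorted (PySem.Set.ofList ls) (fun x => x) with harr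
  have hmem : ∀ x, x ∈ arr ↔ x ∈ ls := by
    intro x
    rw [harr, PySem.List.mem_sorted, PySem.Set.mem_ofList]
  have hA : (ls.any (fun i =>
      (PySem.List.pyRange 0 ((ls.length : Int) - 1) 1).any (fun k =>
        ls.contains (i - PySem.List.pyGetD ls (k + 1) 0) ||
        ls.contains (PySem.List.pyGetD ls (k + 1) 0 - i))) = true) ↔ sumCond ls := by
    rw [List.any_eq_true]
    rw [← acond_iff_sumCond ls (values_counter_pos cs)]
    constructor
    · rintro ⟨i, hi, hinner⟩
      exact ⟨i, hi, (inner_any_iff ls i).1 hinner⟩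
    · rintro ⟨i, hi, hinner⟩
      exact ⟨i, hi, (inner_any_iff ls i).2 hinner⟩
  have hB : (arr.any (fun t => twoPtr arr t 0 ((arr.length : Int) - 1)) = true) ↔ sumCond arr :=
    bcond_iff_sumCond arr (by rw [harr, hls]; exact PySem.List.sorted_ofList_pairwise_lt _)
  have hbools :
      (ls.any (fun i =>
        (PySem.List.pyRange 0 ((ls.length : Int) - 1) 1).any (fun k =>
          ls.contains (i - PySem.List.pyGetD ls (k + 1) 0) ||
          ls.contains (PySem.List.pyGetD ls (k + 1) 0 - i))))
      = (arr.any (fun t => twoPtr arr t 0 ((arr.length : Int) - 1))) := by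
    rw [Bool.eq_iff_iff, hA, hB]
    exact (sumCond_congr hmem).symm
  rw [hbools]
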